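-- pv_equiv track=rewrite | github.com/fadavi/aoc2024 | src/day01.py | calc_similarity_score
-- ===== SOURCE A (Python) =====
-- from functools import reduce
--
-- IntList = list[int]
--
-- def prepare_freq_dict(data: IntList):
--     return reduce(
--         lambda acc, n: {**acc, n: acc.get(n, 0) + 1},
--         data,
--         {},
--     )
--
-- def calc_similarity_score(left_list: IntList, right_list: IntList):
--     left_freq = prepare_freq_dict(left_list)
--     right_freq = prepare_freq_dict(right_list)
--
--     score = 0
--
--     for val, l_freq in left_freq.items():
--         r_freq = right_freq.get(val, 0)
--         score += l_freq * r_freq * val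
--
--     return score
-- ===== SOURCE B (Python) =====
-- def calc_similarity_score(left_list, right_list):
--     right_freq = {}
--     for n in right_list:
--         right_freq[n] = right_freq.get(n, 0) + 1
--     score = 0
--     for val in left_list:
--         score += val * right_freq.get(val, 0)
--     return score
-- ===== Notes on version B (the rewrite author's own statement) =====
-- stated objective: faster
-- what changed: B builds a frequency dict only for the right list and accumulates val * right_freq.get(val, 0) while iterating the raw left list once, eliminating A's left-side grouping and its reduce that copies the whole dict ({**acc, ...}) at every step.
import Mathlib
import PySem

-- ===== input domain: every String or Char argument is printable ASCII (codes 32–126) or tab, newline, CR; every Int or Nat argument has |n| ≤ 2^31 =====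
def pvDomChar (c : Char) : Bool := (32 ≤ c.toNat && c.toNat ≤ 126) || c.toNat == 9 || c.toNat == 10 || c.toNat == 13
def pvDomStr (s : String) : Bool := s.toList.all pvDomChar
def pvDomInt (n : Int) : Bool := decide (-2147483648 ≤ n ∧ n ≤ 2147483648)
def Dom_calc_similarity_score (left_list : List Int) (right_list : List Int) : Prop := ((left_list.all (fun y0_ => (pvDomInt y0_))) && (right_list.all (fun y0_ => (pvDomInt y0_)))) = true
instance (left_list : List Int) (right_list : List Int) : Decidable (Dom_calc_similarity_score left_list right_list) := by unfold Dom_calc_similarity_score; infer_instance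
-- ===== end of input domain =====

-- B drops A's left-side grouping: it builds a frequency dict for the right list only
-- and sums val * right_freq(val) over the raw left list in one pass.

-- ===== PORT A =====
-- reduce(lambda acc, n: {**acc, n: acc.get(n, 0) + 1}, data, {}) : overwrite keeps position, like insert
def prepare_freq_dict (data : List Int) : PySem.Dict Int Int :=
  data.foldl (fun acc n => acc.insert n (acc.getD n 0 + 1)) PySem.Dict.empty

def calc_similarity_score (left_list : List Int) (right_list : List Int) : Int :=
  let left_freq := prepare_freq_dict left_list
  let right_freq := prepare_freq_dict right_list
  left_freq.items.foldl (fun score p => score + p.2 * right_freq.getD p.1 0 * p.1) 0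

-- ===== PORT B =====
def calc_similarity_score_alt (left_list : List Int) (right_list : List Int) : Int :=
  let right_freq := right_list.foldl (fun d n => d.insert n (d.getD n 0 + 1)) PySem.Dict.empty
  left_list.foldl (fun score val => score + val * right_freq.getD val 0) 0

-- ===== PRECONDITION & SPEC =====
def Spec_calc_similarity_score (left_list : List Int) (right_list : List Int) (out : Int) : Prop := out = calc_similarity_score_alt left_list right_list
instance (left_list : List Int) (right_list : List Int) (out : Int) : Decidable (Spec_calc_similarity_score left_list right_list out) := by unfold Spec_calc_similarity_score; infer_instance

-- ===== CLAIM (what is proved, stated in full; the proofs are below) =====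
def Claim_equal_calc_similarity_score : Prop := ∀ (left_list : List Int) (right_list : List Int), Dom_calc_similarity_score left_list right_list → Spec_calc_similarity_score left_list right_list (calc_similarity_score left_list right_list)

-- ===== LEMMAS AND PROOFS =====

-- summing an indicator over a Nodup list picks out the single hit
theorem pv_sum_ite (D : List Int) (x : Int) (g : Int → Int) (hnd : D.Nodup) :
    ((D.map (fun k => if k = x then g k else 0)).sum) = if x ∈ D then g x else 0 := by
  induction D with
  | nil => simp
  | cons d D ih =>
    rcases List.nodup_cons.mp hnd with ⟨hd, hnd'⟩
    simp only [List.map_cons, List.sum_cons, ih hnd', List.mem_cons]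
    by_cases hx : d = x
    · subst hx
      simp [if_neg hd]
    · have hx' : ¬ x = d := fun h => hx h.symm
      simp [hx, hx']

-- sum over distinct keys of count·g equals sum of g over the raw list
theorem pv_sum_count (xs : List Int) (g : Int → Int) :
    ∀ (D : List Int), D.Nodup → (∀ a ∈ xs, a ∈ D) →
      ((D.map (fun k => (xs.count k : Int) * g k)).sum) = (xs.map g).sum := by
  induction xs with
  | nil => intro D _ _; simp
  | cons x xs ih =>
    intro D hnd hsub
    have hsplit : ∀ k : Int, ((x :: xs).count k : Int) * g k
        = (xs.count k : Int) * g k + (if k = x then g k else 0) := by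
      intro k
      by_cases h : k = x
      · subst h; simp [List.count_cons_self]; ring
      · simp [List.count_cons, h]
        exact Or.inl fun he => h he.symm
    calc (D.map (fun k => ((x :: xs).count k : Int) * g k)).sum
        = (D.map (fun k => (xs.count k : Int) * g k + (if k = x then g k else 0))).sum := by
          simp only [hsplit]
      _ = (D.map (fun k => (xs.count k : Int) * g k)).sum
            + (D.map (fun k => if k = x then g k else 0)).sum := by
          rw [← List.sum_map_add]
      _ = (xs.map g).sum + g x := by
          rw [ih D hnd (fun a ha => hsub a (List.mem_cons_of_mem _ ha)),
              pv_sum_ite D x g hnd, if_pos (hsub x (List.mem_cons_self))]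
      _ = ((x :: xs).map g).sum := by simp [add_comm]

-- ===== VERDICT (by name: the statement is the Claim_ definition above) =====
theorem calc_similarity_score_spec : Claim_equal_calc_similarity_score := by
  intro left_list right_list _
  simp only [Spec_calc_similarity_score, calc_similarity_score, calc_similarity_score_alt,
    prepare_freq_dict, PySem.Dict.foldl_insert_getD_add_one_eq_counter, PySem.Dict.items_counter]
  simp only [List.foldl_map]
  rw [PySem.List.foldl_add _ (fun k => (left_list.count k : Int) * ((PySem.Dict.counter right_list).getD k 0) * k),
      PySem.List.foldl_add _ (fun v => v * (PySem.Dict.counter right_list).getD v 0)]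
  have h := pv_sum_count left_list (fun k => (PySem.Dict.counter right_list).getD k 0 * k)
    (PySem.Set.ofList left_list) (PySem.Set.nodup_ofList left_list)
    (fun a ha => (PySem.Set.mem_ofList _ _).mpr ha)
  simp only [mul_assoc] at h ⊢
  rw [h]
  simp only [zero_add]
  exact congrArg List.sum (List.map_congr_left fun a _ =>
    mul_comm ((PySem.Dict.counter right_list).getD a 0) a)
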